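-- pv_equiv track=rewrite | github.com/rogerzzz123/coding_mianjing | robinhood/q1.py | unmatched_trades
-- ===== SOURCE A (Python) =====
-- from collections import Counter
--
-- def unmatched_trades(house: list, street:list):
--     house_count=Counter(house)
--     street_count=Counter(street)
--
--     for trade in list(house_count.keys()):
--         if trade in street_count:
--             num=min(house_count[trade], street_count[trade])
--             house_count[trade]-=num
--             street_count[trade]-=num
--
--     res=[]
--     for trade, count in house_count.items():
--         if count>0:
--             res.extend([trade]*count)
--     for trade, count in street_count.items():
--         if count>0:
--             res.extend([trade]*count)
--     return sorted(res)
-- ===== SOURCE B (Python) =====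
-- def unmatched_trades(house: list, street: list):
--     h = sorted(house)
--     s = sorted(street)
--     i, j = 0, 0
--     res = []
--     while i < len(h) and j < len(s):
--         if h[i] == s[j]:
--             i += 1
--             j += 1
--         elif h[i] < s[j]:
--             res.append(h[i])
--             i += 1
--         else:
--             res.append(s[j])
--             j += 1
--     res.extend(h[i:])
--     res.extend(s[j:])
--     return res
-- ===== Notes on version B (the rewrite author's own statement) =====
-- stated objective: alternative
-- what changed: Replaces A's Counter-build, key-cancellation loop and final sort with sorting both lists first and a two-pointer merge that drops matched pairs and emits the rest already in order, so no hash counters and no final sort are needed.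
import Mathlib
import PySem

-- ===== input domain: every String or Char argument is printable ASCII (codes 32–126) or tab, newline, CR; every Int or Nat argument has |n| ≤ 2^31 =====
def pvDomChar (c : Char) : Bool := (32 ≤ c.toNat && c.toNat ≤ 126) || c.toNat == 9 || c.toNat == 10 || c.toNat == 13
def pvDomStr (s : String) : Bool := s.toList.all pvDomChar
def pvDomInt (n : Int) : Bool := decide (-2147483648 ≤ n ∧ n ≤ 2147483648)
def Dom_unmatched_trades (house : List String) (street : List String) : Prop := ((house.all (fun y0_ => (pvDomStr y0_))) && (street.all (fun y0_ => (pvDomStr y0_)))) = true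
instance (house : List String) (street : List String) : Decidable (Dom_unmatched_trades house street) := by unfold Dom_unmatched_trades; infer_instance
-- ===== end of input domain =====

-- B replaces A's Counter-cancel-then-sort with a two-pointer merge of the two sorted
-- lists that cancels equal elements in place (objective: alternative algorithm).

-- ===== PORT A =====
-- the cancellation loop over list(house_count.keys()), state = (house_count, street_count)
def pvCancelStep (st : PySem.Dict String Int × PySem.Dict String Int) (trade : String) :
    PySem.Dict String Int × PySem.Dict String Int :=
  if st.2.contains trade then
    let num := min (st.1.getD trade 0) (st.2.getD trade 0)
    (st.1.insert trade (st.1.getD trade 0 - num), st.2.insert trade (st.2.getD trade 0 - num))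
  else st

-- 'for trade, count in d.items(): if count>0: res.extend([trade]*count)'
def pvEmit (d : PySem.Dict String Int) (res : List String) : List String :=
  d.items.foldl (fun acc p => if p.2 > 0 then acc ++ PySem.List.pyRepeat [p.1] p.2 else acc) res

def unmatched_trades (house : List String) (street : List String) : List String :=
  let house_count := PySem.Dict.counter house
  let street_count := PySem.Dict.counter street
  let fin := house_count.keys.foldl pvCancelStep (house_count, street_count)
  let res : List String := []
  let res := pvEmit fin.1 res
  let res := pvEmit fin.2 res
  PySem.List.sorted res (fun x => x) false

-- ===== PORT B =====
-- the two-pointer while loop of Source B: advance both on a match, emit the smaller side,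
-- then the leftover tail of either list
def pvMergeDiff : List String → List String → List String
  | [], ys => ys
  | x :: xs, [] => x :: xs
  | x :: xs, y :: ys =>
    if x == y then pvMergeDiff xs ys
    else if x < y then x :: pvMergeDiff xs (y :: ys)
    else y :: pvMergeDiff (x :: xs) ys
termination_by a b => a.length + b.length

def unmatched_trades_alt (house : List String) (street : List String) : List String :=
  pvMergeDiff (PySem.List.sorted house (fun x => x) false)
              (PySem.List.sorted street (fun x => x) false)

-- ===== PRECONDITION & SPEC =====
def Spec_unmatched_trades (house : List String) (street : List String) (out : List String) : Prop := out = unmatched_trades_alt house street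
instance (house : List String) (street : List String) (out : List String) : Decidable (Spec_unmatched_trades house street out) := by unfold Spec_unmatched_trades; infer_instance

-- ===== CLAIM (what is proved, stated in full; the proofs are below) =====
def Claim_equal_unmatched_trades : Prop := ∀ (house : List String) (street : List String), Dom_unmatched_trades house street → Spec_unmatched_trades house street (unmatched_trades house street)

-- ===== LEMMAS AND PROOFS =====

-- membership in the merge result
theorem pvMergeDiff_mem (xs ys : List String) (z : String)
    (h : z ∈ pvMergeDiff xs ys) : z ∈ xs ∨ z ∈ ys := by
  fun_induction pvMergeDiff xs ys with
  | case1 => exact Or.inr h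
  | case2 => exact Or.inl h
  | case3 x xs y ys heq ih =>
    rcases ih h with h | h
    · exact Or.inl (List.mem_cons_of_mem _ h)
    · exact Or.inr (List.mem_cons_of_mem _ h)
  | case4 x xs y ys heq hlt ih =>
    rcases List.mem_cons.mp h with h | h
    · exact Or.inl (h ▸ List.mem_cons_self)
    · rcases ih h with h | h
      · exact Or.inl (List.mem_cons_of_mem _ h)
      · exact Or.inr h
  | case5 x xs y ys heq hlt ih =>
    rcases List.mem_cons.mp h with h | h
    · exact Or.inr (h ▸ List.mem_cons_self)
    · rcases ih h with h | h
      · exact Or.inl h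
      · exact Or.inr (List.mem_cons_of_mem _ h)

-- the merge of two ≤-sorted lists is ≤-sorted
theorem pvMergeDiff_pairwise (xs ys : List String)
    (hx : xs.Pairwise (· ≤ ·)) (hy : ys.Pairwise (· ≤ ·)) :
    (pvMergeDiff xs ys).Pairwise (· ≤ ·) := by
  fun_induction pvMergeDiff xs ys with
  | case1 => exact hy
  | case2 => exact hx
  | case3 x xs y ys heq ih =>
    exact ih (List.Pairwise.of_cons hx) (List.Pairwise.of_cons hy)
  | case4 x xs y ys heq hlt ih =>
    refine List.pairwise_cons.mpr ⟨?_, ih (List.Pairwise.of_cons hx) hy⟩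
    intro z hz
    rcases pvMergeDiff_mem _ _ _ hz with h | h
    · exact (List.pairwise_cons.mp hx).1 z h
    · rcases List.mem_cons.mp h with h | h
      · exact h ▸ le_of_lt hlt
      · exact le_trans (le_of_lt hlt) ((List.pairwise_cons.mp hy).1 z h)
  | case5 x xs y ys heq hlt ih =>
    have hyx : y ≤ x := le_of_not_gt hlt
    refine List.pairwise_cons.mpr ⟨?_, ih hx (List.Pairwise.of_cons hy)⟩
    intro z hz
    rcases pvMergeDiff_mem _ _ _ hz with h | h
    · rcases List.mem_cons.mp h with h | h
      · exact h ▸ hyx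
      · exact le_trans hyx ((List.pairwise_cons.mp hx).1 z h)
    · exact (List.pairwise_cons.mp hy).1 z h

-- counts in the merge result: the positive count difference on each side
theorem pvMergeDiff_count (xs ys : List String)
    (hx : xs.Pairwise (· ≤ ·)) (hy : ys.Pairwise (· ≤ ·)) (v : String) :
    (pvMergeDiff xs ys).count v = (xs.count v - ys.count v) + (ys.count v - xs.count v) := by
  fun_induction pvMergeDiff xs ys with
  | case1 ys => simp
  | case2 x xs => simp
  | case3 x xs y ys heq ih =>
    have hxy : x = y := by simpa using heq
    subst hxy
    rw [ih (List.Pairwise.of_cons hx) (List.Pairwise.of_cons hy)]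
    by_cases hv : v = x
    · subst hv; simp
    · have hb : (x == v) = false := beq_eq_false_iff_ne.mpr (Ne.symm hv)
      simp [List.count_cons, hb]
  | case4 x xs y ys heq hlt ih =>
    simp only [List.count_cons]
    rw [ih (List.Pairwise.of_cons hx) hy]
    by_cases hv : v = x
    · subst hv
      have hyv : (y == v) = false := beq_eq_false_iff_ne.mpr (ne_of_gt hlt)
      have h0 : ys.count v = 0 := List.count_eq_zero.mpr
        (fun hmem => absurd (lt_of_lt_of_le hlt ((List.pairwise_cons.mp hy).1 _ hmem)) (lt_irrefl _))
      simp [List.count_cons, hyv, h0]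
    · have hb : (x == v) = false := beq_eq_false_iff_ne.mpr (Ne.symm hv)
      simp [List.count_cons, hb]
  | case5 x xs y ys heq hlt ih =>
    have hxny : x ≠ y := by simpa using heq
    have hylt : y < x := lt_of_le_of_ne (le_of_not_gt hlt) (Ne.symm hxny)
    simp only [List.count_cons]
    rw [ih hx (List.Pairwise.of_cons hy)]
    by_cases hv : v = y
    · subst hv
      have hxv : (x == v) = false := beq_eq_false_iff_ne.mpr (ne_of_gt hylt)
      have h0 : xs.count v = 0 := List.count_eq_zero.mpr
        (fun hmem => absurd (lt_of_lt_of_le hylt ((List.pairwise_cons.mp hx).1 _ hmem)) (lt_irrefl _))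
      simp [List.count_cons, hxv, h0]
    · have hb : (y == v) = false := beq_eq_false_iff_ne.mpr (Ne.symm hv)
      simp [List.count_cons, hb]

-- values after the cancellation loop, pointwise
theorem pvCancel_getD (ks : List String) (d e : PySem.Dict String Int)
    (hnd : ks.Nodup) (v : String) :
    ((ks.foldl pvCancelStep (d, e)).1.getD v 0 =
        if v ∈ ks ∧ e.contains v then d.getD v 0 - min (d.getD v 0) (e.getD v 0) else d.getD v 0) ∧
    ((ks.foldl pvCancelStep (d, e)).2.getD v 0 =
        if v ∈ ks ∧ e.contains v then e.getD v 0 - min (d.getD v 0) (e.getD v 0) else e.getD v 0) := by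
  induction ks generalizing d e with
  | nil => simp
  | cons t rest ih =>
    have hndr : rest.Nodup := hnd.of_cons
    have htr : t ∉ rest := (List.nodup_cons.mp hnd).1
    simp only [List.foldl_cons]
    by_cases hc : e.contains t = true
    · rw [show pvCancelStep (d, e) t =
          (d.insert t (d.getD t 0 - min (d.getD t 0) (e.getD t 0)),
           e.insert t (e.getD t 0 - min (d.getD t 0) (e.getD t 0))) by
        simp [pvCancelStep, hc]]
      obtain ⟨ih1, ih2⟩ := ih _ _ hndr
      rw [ih1, ih2]
      by_cases hv : v = t
      · subst hv
        have hvr : v ∉ rest := htr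
        simp [hvr, PySem.Dict.getD_insert_self, hc]
      · rw [PySem.Dict.getD_insert_of_ne _ _ _ hv, PySem.Dict.getD_insert_of_ne _ _ _ hv]
        have hcv : (e.insert t (e.getD t 0 - min (d.getD t 0) (e.getD t 0))).contains v = e.contains v := by
          rw [PySem.Dict.contains_insert]
          simp [beq_eq_false_iff_ne.mpr hv]
        rw [hcv]
        simp [List.mem_cons, hv]
    · rw [show pvCancelStep (d, e) t = (d, e) by simp [pvCancelStep, hc]]
      obtain ⟨ih1, ih2⟩ := ih _ _ hndr
      rw [ih1, ih2]
      by_cases hv : v = t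
      · subst hv
        simp [htr, hc]
      · simp [List.mem_cons, hv]

-- keys are untouched by the cancellation loop
theorem pvCancel_keys (ks : List String) (d e : PySem.Dict String Int)
    (hd : ∀ t ∈ ks, d.contains t = true) :
    (ks.foldl pvCancelStep (d, e)).1.keys = d.keys ∧
    (ks.foldl pvCancelStep (d, e)).2.keys = e.keys := by
  induction ks generalizing d e with
  | nil => simp
  | cons t rest ih =>
    simp only [List.foldl_cons]
    by_cases hc : e.contains t = true
    · rw [show pvCancelStep (d, e) t =
          (d.insert t (d.getD t 0 - min (d.getD t 0) (e.getD t 0)),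
           e.insert t (e.getD t 0 - min (d.getD t 0) (e.getD t 0))) by
        simp [pvCancelStep, hc]]
      have hrest : ∀ s ∈ rest, (d.insert t (d.getD t 0 - min (d.getD t 0) (e.getD t 0))).contains s = true := by
        intro s hs
        rw [PySem.Dict.contains_insert]
        simp [hd s (List.mem_cons_of_mem _ hs)]
      obtain ⟨h1, h2⟩ := ih _ _ hrest
      exact ⟨h1.trans (PySem.Dict.keys_insert_of_contains _ _ (hd t List.mem_cons_self)),
        h2.trans (PySem.Dict.keys_insert_of_contains _ _ hc)⟩
    · rw [show pvCancelStep (d, e) t = (d, e) by simp [pvCancelStep, hc]]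
      exact ih _ _ (fun s hs => hd s (List.mem_cons_of_mem _ hs))

theorem pvCount_flatMap_replicate (ks : List String) (f : String → Nat) (v : String)
    (hnd : ks.Nodup) :
    (ks.flatMap (fun k => List.replicate (f k) k)).count v = if v ∈ ks then f v else 0 := by
  induction ks with
  | nil => simp
  | cons k rest ih =>
    simp only [List.flatMap_cons, List.count_append, ih hnd.of_cons]
    by_cases hv : v = k
    · subst hv
      have : v ∉ rest := (List.nodup_cons.mp hnd).1
      simp [this]
    · simp [List.count_replicate, hv, Ne.symm hv, List.mem_cons]

-- counts in the emitted list
theorem pvEmit_count (d : PySem.Dict String Int) (res : List String)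
    (hnd : d.keys.Nodup) (v : String) :
    (pvEmit d res).count v = res.count v + (d.getD v 0).toNat * (if v ∈ d.keys then 1 else 0) := by
  unfold pvEmit
  have hstep : ∀ (acc : List String) (p : String × Int),
      (fun acc (p : String × Int) => if p.2 > 0 then acc ++ PySem.List.pyRepeat [p.1] p.2 else acc) acc p
        = acc ++ List.replicate p.2.toNat p.1 := by
    intro acc p
    by_cases hp : p.2 > 0
    · simp [hp, PySem.List.pyRepeat_singleton]
    · have : p.2.toNat = 0 := by omega
      simp [hp, this]
  have key := PySem.List.foldl_congr_mem d.items
      (fun acc (p : String × Int) => if p.2 > 0 then acc ++ PySem.List.pyRepeat [p.1] p.2 else acc)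
      (fun acc (p : String × Int) => acc ++ List.replicate p.2.toNat p.1) res
      (fun acc x _ => hstep acc x)
  rw [key, PySem.List.foldl_append_eq_flatMap]
  rw [PySem.Dict.items_eq_map_keys d hnd 0, List.count_append, List.flatMap_map,
    pvCount_flatMap_replicate _ _ _ hnd]
  split_ifs with h <;> simp

-- both emissions together count every value |house.count v - street.count v| times
theorem unmatched_count (house street : List String) (v : String) :
    (pvEmit ((PySem.Dict.counter house).keys.foldl pvCancelStep
        (PySem.Dict.counter house, PySem.Dict.counter street)).2
      (pvEmit ((PySem.Dict.counter house).keys.foldl pvCancelStep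
        (PySem.Dict.counter house, PySem.Dict.counter street)).1 [])).count v =
      (house.count v - street.count v) + (street.count v - house.count v) := by
  set hc := PySem.Dict.counter house with hhc
  set sc := PySem.Dict.counter street with hsc
  set st := hc.keys.foldl pvCancelStep (hc, sc) with hst
  have hnd : hc.keys.Nodup := PySem.Dict.nodup_keys_counter house
  have hd : ∀ t ∈ hc.keys, hc.contains t = true :=
    fun t ht => (PySem.Dict.contains_iff_mem_keys hc t).mpr ht
  obtain ⟨hk1, hk2⟩ := pvCancel_keys hc.keys hc sc hd
  obtain ⟨hg1, hg2⟩ := pvCancel_getD hc.keys hc sc hnd v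
  have nd1 : st.1.keys.Nodup := by rw [hk1]; exact hnd
  have nd2 : st.2.keys.Nodup := by rw [hk2]; exact PySem.Dict.nodup_keys_counter street
  rw [pvEmit_count st.2 _ nd2 v, pvEmit_count st.1 [] nd1 v,
    hk1, hk2, hg1, hg2, List.count_nil,
    hhc, hsc, PySem.Dict.getD_counter, PySem.Dict.getD_counter,
    PySem.Dict.keys_counter, PySem.Dict.keys_counter, PySem.Dict.contains_counter]
  by_cases hh : v ∈ house <;> by_cases hs : v ∈ street
  · simp only [PySem.Set.mem_ofList, hh, hs, List.contains_eq_mem, decide_true, and_self,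
      if_true]
    omega
  · have h0 : street.count v = 0 := List.count_eq_zero.mpr hs
    simp only [PySem.Set.mem_ofList, hh, hs, List.contains_eq_mem, decide_false,
      Bool.false_eq_true, and_false, if_false, if_true, h0]
    omega
  · have h0 : house.count v = 0 := List.count_eq_zero.mpr hh
    simp only [PySem.Set.mem_ofList, hh, hs, List.contains_eq_mem, decide_true, false_and,
      if_false, if_true, h0]
    omega
  · have h0 : street.count v = 0 := List.count_eq_zero.mpr hs
    have h1 : house.count v = 0 := List.count_eq_zero.mpr hh
    simp only [PySem.Set.mem_ofList, hh, hs, List.contains_eq_mem, decide_false, false_and,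
      if_false, h0, h1]
    omega

-- ===== VERDICT (by name: the statement is the Claim_ definition above) =====
theorem unmatched_trades_spec : Claim_equal_unmatched_trades := by
  intro house street _
  unfold Spec_unmatched_trades unmatched_trades unmatched_trades_alt
  apply PySem.List.sorted_id_eq_of_perm_of_pairwise
  · apply List.perm_iff_count.mpr
    intro v
    rw [pvMergeDiff_count _ _ (PySem.List.sorted_pairwise house (fun x => x) )
        (PySem.List.sorted_pairwise street (fun x => x)) v,
      (PySem.List.sorted_perm house (fun x => x) false).count_eq,
      (PySem.List.sorted_perm street (fun x => x) false).count_eq,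
      unmatched_count]
  · exact pvMergeDiff_pairwise _ _ (PySem.List.sorted_pairwise house (fun x => x))
      (PySem.List.sorted_pairwise street (fun x => x))
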